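-- pv_equiv track=rewrite | github.com/cmychina/Leetcode | leetcode_深度广度优先遍历_水域大小.py | pondSizes
-- ===== SOURCE A (Python) =====
-- def pondSizes(land):
--     M=len(land)
--     N=len(land[0])
--     res=[]
--     def dfs(i,j):
--         if not (0<=i<M and 0<=j<N and land[i][j]==0):
--             return 0
--         land[i][j]=1
--         k=1
--         #上下左右
--         k+=dfs(i+1,j)
--         k+=dfs(i-1,j)
--         k+=dfs(i,j+1)
--         k+=dfs(i,j-1)
--         #对角线
--         k+=dfs(i-1,j-1)
--         k+=dfs(i+1,j+1)
--         k+=dfs(i-1,j+1)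
--         k+=dfs(i+1,j-1)
--
--         return k
--
--
--     for i in range(M):
--         for j in range(N):
--             if land[i][j]==0:
--                 k=dfs(i,j)
--                 res.append(k)
--     return sorted(res)
-- ===== SOURCE B (Python) =====
-- def pondSizes(land):
--     # Iterative flood fill with an explicit stack instead of A's recursive dfs.
--     # Mutates land in place exactly like A (every counted cell is set to 1).
--     M = len(land)
--     N = len(land[0])
--     DIRS = [(1, 0), (-1, 0), (0, 1), (0, -1), (-1, -1), (1, 1), (-1, 1), (1, -1)]
--     res = []
--     for i in range(M):
--         for j in range(N):
--             if land[i][j] == 0: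
--                 size = 0
--                 stack = [(i, j)]
--                 while stack:
--                     a, b = stack.pop()
--                     if 0 <= a < M and 0 <= b < N and land[a][b] == 0:
--                         land[a][b] = 1
--                         size += 1
--                         # push in reversed order so pops visit neighbours in DIRS order
--                         for da, db in reversed(DIRS):
--                             stack.append((a + da, b + db))
--                 res.append(size)
--     return sorted(res)
-- ===== Notes on version B (the rewrite author's own statement) =====
-- stated objective: alternative
-- what changed: A's recursive dfs is replaced by an iterative flood fill over an explicit stack (pop a cell, test bounds/zero, mark, count, push its 8 neighbours in reversed order so pops follow A's visiting order); outer scan and final sorted(res) are kept.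
import Mathlib
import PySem

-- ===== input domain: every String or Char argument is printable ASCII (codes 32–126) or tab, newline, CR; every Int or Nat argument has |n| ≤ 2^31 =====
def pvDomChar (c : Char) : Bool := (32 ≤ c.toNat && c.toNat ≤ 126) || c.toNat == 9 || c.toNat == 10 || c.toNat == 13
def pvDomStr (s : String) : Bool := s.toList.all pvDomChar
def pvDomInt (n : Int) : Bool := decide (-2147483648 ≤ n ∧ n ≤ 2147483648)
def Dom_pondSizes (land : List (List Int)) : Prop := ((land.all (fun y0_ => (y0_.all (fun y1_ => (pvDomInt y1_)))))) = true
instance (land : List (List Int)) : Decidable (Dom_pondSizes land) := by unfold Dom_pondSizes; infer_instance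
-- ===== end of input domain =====

set_option maxHeartbeats 1000000

-- B replaces A's recursive dfs by an iterative flood fill with an explicit stack (alternative
-- decomposition, same cost).  Both Pythons mutate `land` in place identically (every counted
-- 0-cell is set to 1); the equivalence proved here is about the RETURN value.

-- ===== PORT A =====
-- shared pure helpers for reading/writing one grid cell; both programs only evaluate them
-- under the 0<=i<M and 0<=j<N guard, where pyGetD/pySetD are exact for land[i][j]
def pvCell (g : List (List Int)) (i j : Int) : Int :=
  PySem.List.pyGetD (PySem.List.pyGetD g i []) j 1

def pvMark (g : List (List Int)) (i j : Int) : List (List Int) :=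
  PySem.List.pySetD g i (PySem.List.pySetD (PySem.List.pyGetD g i []) j (1 : Int))

-- the 8 neighbours, in exactly the order A's dfs recurses on them
def pvNbrs (i j : Int) : List (Int × Int) :=
  [(i+1,j), (i-1,j), (i,j+1), (i,j-1), (i-1,j-1), (i+1,j+1), (i-1,j+1), (i+1,j-1)]

-- fuel bound: number of 0-cells in the grid (each productive call consumes one)
def pvZ (g : List (List Int)) : Nat := (g.map (fun r => r.count 0)).sum

-- A's recursive dfs; the fuel only makes the recursion structural (pvZ g + 1 always suffices,
-- proved by pvDfs_mono below)
def pvDfs (M N : Int) : Nat → List (List Int) → Int → Int → Int × List (List Int)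
  | 0, g, _, _ => (0, g)
  | f+1, g, i, j =>
    if 0 ≤ i ∧ i < M ∧ 0 ≤ j ∧ j < N ∧ pvCell g i j = 0 then
      -- land[i][j]=1; k=1; then the eight k += dfs(...) in A's order, threading the grid
      (pvNbrs i j).foldl
        (fun acc c => (acc.1 + (pvDfs M N f acc.2 c.1 c.2).1, (pvDfs M N f acc.2 c.1 c.2).2))
        (1, pvMark g i j)
    else (0, g)

def pvRun (M N : Int) (g : List (List Int)) (i j : Int) : Int × List (List Int) :=
  pvDfs M N (pvZ g + 1) g i j

def pondSizes (land : List (List Int)) : List Int :=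
  let M : Int := land.length
  let N : Int := (PySem.List.pyGetD land 0 []).length
  let fin :=
    (PySem.List.pyRange 0 M 1).foldl (fun s i =>
      (PySem.List.pyRange 0 N 1).foldl
        (fun (s : List (List Int) × List Int) j =>
          if pvCell s.1 i j = 0 then
            ((pvRun M N s.1 i j).2, s.2 ++ [(pvRun M N s.1 i j).1])
          else s) s) (land, ([] : List Int))
  PySem.List.sorted fin.2 (fun x => x) false

-- ===== PORT B =====
-- B's while loop over the explicit stack.  The Lean list holds the stack TOP FIRST
-- (Python appends/pops at the END), so Source B's `stack.pop()` takes the head here, and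
-- pushing the 8 neighbours in reversed(DIRS) order is prepending `pvNbrs i j ++ st`.
def pvLoop (M N : Int) : Nat → List (List Int) → List (Int × Int) → Int → Int × List (List Int)
  | _, g, [], k => (k, g)
  | 0, g, _ :: _, k => (k, g)   -- dead branch: the supplied fuel always suffices
  | f+1, g, c :: st, k =>
    if 0 ≤ c.1 ∧ c.1 < M ∧ 0 ≤ c.2 ∧ c.2 < N ∧ pvCell g c.1 c.2 = 0 then
      pvLoop M N f (pvMark g c.1 c.2) (pvNbrs c.1 c.2 ++ st) (k + 1)
    else pvLoop M N f g st k

def pondSizes_alt (land : List (List Int)) : List Int :=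
  let M : Int := land.length
  let N : Int := (PySem.List.pyGetD land 0 []).length
  let fin :=
    (PySem.List.pyRange 0 M 1).foldl (fun s i =>
      (PySem.List.pyRange 0 N 1).foldl
        (fun (s : List (List Int) × List Int) j =>
          if pvCell s.1 i j = 0 then
            ((pvLoop M N (8 * pvZ s.1 + 2) s.1 [(i, j)] 0).2,
             s.2 ++ [(pvLoop M N (8 * pvZ s.1 + 2) s.1 [(i, j)] 0).1])
          else s) s) (land, ([] : List Int))
  PySem.List.sorted fin.2 (fun x => x) false

-- ===== PRECONDITION & SPEC =====
-- Pre_ excludes exactly the inputs where the Python A raises IndexError: the empty grid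
-- (len(land[0])) and ragged grids having a row shorter than row 0 (land[i][j], j < N).
def Pre_pondSizes (land : List (List Int)) : Prop :=
  land ≠ [] ∧ ∀ r ∈ land, (PySem.List.pyGetD land 0 []).length ≤ r.length
instance (land : List (List Int)) : Decidable (Pre_pondSizes land) := by
  unfold Pre_pondSizes; infer_instance

def pvWitness_pondSizes : List (List Int) := [[0, 1, 0], [1, 0, 1], [0, 0, 7]]

def Spec_pondSizes (land : List (List Int)) (out : List Int) : Prop := out = pondSizes_alt land
instance (land : List (List Int)) (out : List Int) : Decidable (Spec_pondSizes land out) := by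
  unfold Spec_pondSizes; infer_instance

-- ===== CLAIM (what is proved, stated in full; the proofs are below) =====
def Claim_equal_pondSizes : Prop :=
  ∀ (land : List (List Int)), Dom_pondSizes land → Pre_pondSizes land →
    Spec_pondSizes land (pondSizes land)

-- ===== LEMMAS AND PROOFS =====

-- grid shape invariant: at least M rows, each of length at least N
def pvShape (M N : Int) (g : List (List Int)) : Prop :=
  M ≤ (g.length : Int) ∧ ∀ r ∈ g, N ≤ (r.length : Int)

-- A's per-neighbour step in canonical-fuel form
def pvStep (M N : Int) (acc : Int × List (List Int)) (c : Int × Int) :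
    Int × List (List Int) :=
  (acc.1 + (pvRun M N acc.2 c.1 c.2).1, (pvRun M N acc.2 c.1 c.2).2)

theorem pvZ_cons (r : List Int) (g : List (List Int)) : pvZ (r :: g) = r.count 0 + pvZ g := by
  simp [pvZ]

theorem pvZ_set (g : List (List Int)) : ∀ (n : Nat) (r' : List Int) (hn : n < g.length),
    pvZ (g.set n r') + (g[n]).count 0 = pvZ g + r'.count 0 := by
  induction g with
  | nil => intro n r' hn; simp at hn
  | cons a gs ih =>
    intro n r' hn
    cases n with
    | zero => simp [pvZ_cons]; omega
    | succ m =>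
      simp only [List.set_cons_succ, pvZ_cons, List.getElem_cons_succ]
      have := ih m r' (by simpa using hn)
      omega

theorem pvCount_set (r : List Int) : ∀ (m : Nat) (hm : m < r.length), r[m] = 0 →
    ((r.set m 1).count 0) + 1 = r.count 0 := by
  induction r with
  | nil => intro m hm; simp at hm
  | cons x xs ih =>
    intro m hm h0
    cases m with
    | zero => simp_all
    | succ m =>
      simp only [List.set_cons_succ, List.count_cons]
      have := ih m (by simpa using hm) (by simpa using h0)
      omega

-- the in-bounds normal form of pvCell and pvMark
theorem pvIdx (M N i j : Int) (g : List (List Int)) (h : pvShape M N g)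
    (hg : 0 ≤ i ∧ i < M ∧ 0 ≤ j ∧ j < N) :
    ∃ (hi : i.toNat < g.length) (hj : j.toNat < (g[i.toNat]).length),
      pvCell g i j = g[i.toNat][j.toNat] ∧
      pvMark g i j = g.set i.toNat ((g[i.toNat]).set j.toNat 1) := by
  obtain ⟨hM, hrows⟩ := h
  obtain ⟨h1, h2, h3, h4⟩ := hg
  have hi : i.toNat < g.length := by omega
  have hrow : g[i.toNat] ∈ g := List.getElem_mem hi
  have hj : j.toNat < (g[i.toNat]).length := by have := hrows _ hrow; omega
  have hrg : PySem.List.pyGetD g i [] = g[i.toNat] :=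
    PySem.List.pyGetD_eq_getElem _ _ h1 (by omega)
  refine ⟨hi, hj, ?_, ?_⟩
  · rw [pvCell, hrg, PySem.List.pyGetD_eq_getElem _ _ h3 (by omega)]
  · rw [pvMark, hrg, PySem.List.pySetD_of_nonneg (h := h3), PySem.List.pySetD_of_nonneg (h := h1)]

theorem pvShape_mark (M N i j : Int) (g : List (List Int)) (h : pvShape M N g)
    (hg : 0 ≤ i ∧ i < M ∧ 0 ≤ j ∧ j < N) : pvShape M N (pvMark g i j) := by
  obtain ⟨hi, hj, -, hm⟩ := pvIdx M N i j g h hg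
  rw [hm]
  refine ⟨by simpa using h.1, ?_⟩
  intro r hr
  rcases List.mem_or_eq_of_mem_set hr with h' | h'
  · exact h.2 r h'
  · subst h'
    simpa using h.2 _ (List.getElem_mem hi)

-- under the guard, marking a 0-cell consumes exactly one zero
theorem pvZ_mark (M N i j : Int) (g : List (List Int)) (h : pvShape M N g)
    (hg : 0 ≤ i ∧ i < M ∧ 0 ≤ j ∧ j < N ∧ pvCell g i j = 0) :
    pvZ (pvMark g i j) + 1 = pvZ g := by
  obtain ⟨hi, hj, hc, hm⟩ := pvIdx M N i j g h ⟨hg.1, hg.2.1, hg.2.2.1, hg.2.2.2.1⟩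
  have h0 : g[i.toNat][j.toNat] = 0 := by rw [← hc]; exact hg.2.2.2.2
  have hs := pvZ_set g i.toNat ((g[i.toNat]).set j.toNat 1) hi
  have hcnt := pvCount_set (g[i.toNat]) j.toNat hj h0
  rw [hm]
  omega

theorem pvZ_pos (M N i j : Int) (g : List (List Int)) (h : pvShape M N g)
    (hg : 0 ≤ i ∧ i < M ∧ 0 ≤ j ∧ j < N ∧ pvCell g i j = 0) : 1 ≤ pvZ g := by
  obtain ⟨hi, hj, hc, -⟩ := pvIdx M N i j g h ⟨hg.1, hg.2.1, hg.2.2.1, hg.2.2.2.1⟩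
  have h0 : (0 : Int) ∈ g[i.toNat] := by
    rw [← hg.2.2.2.2, hc]; exact List.getElem_mem hj
  have h1 : 1 ≤ (g[i.toNat]).count 0 := List.count_pos_iff.mpr h0
  have h2 : (g[i.toNat]).count 0 ≤ pvZ g :=
    List.le_sum_of_mem (List.mem_map_of_mem (List.getElem_mem hi))
  omega

-- generic fold invariant for count-and-grid steps
theorem pvFold_inv {α : Type} (M N : Int)
    (step : Int × List (List Int) → α → Int × List (List Int))
    (h : ∀ acc c, pvShape M N acc.2 →
      pvShape M N (step acc c).2 ∧ pvZ (step acc c).2 ≤ pvZ acc.2) :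
    ∀ (L : List α) acc, pvShape M N acc.2 →
      pvShape M N (L.foldl step acc).2 ∧ pvZ (L.foldl step acc).2 ≤ pvZ acc.2 := by
  intro L
  induction L with
  | nil => intro acc ha; exact ⟨ha, le_rfl⟩
  | cons c L ih =>
    intro acc ha
    have h1 := h acc c ha
    have h2 := ih (step acc c) h1.1
    exact ⟨h2.1, le_trans h2.2 h1.2⟩

theorem pvFold_congr {α : Type} (M N : Int) (B : Nat)
    (s t : Int × List (List Int) → α → Int × List (List Int))
    (hinv : ∀ acc c, pvShape M N acc.2 →
      pvShape M N (s acc c).2 ∧ pvZ (s acc c).2 ≤ pvZ acc.2)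
    (heq : ∀ acc c, pvShape M N acc.2 → pvZ acc.2 ≤ B → s acc c = t acc c) :
    ∀ (L : List α) acc, pvShape M N acc.2 → pvZ acc.2 ≤ B →
      L.foldl s acc = L.foldl t acc := by
  intro L
  induction L with
  | nil => intro acc _ _; rfl
  | cons c L ih =>
    intro acc ha hB
    have he := heq acc c ha hB
    have hi := hinv acc c ha
    rw [List.foldl_cons, List.foldl_cons, he]
    exact ih (t acc c) (he ▸ hi.1) (le_trans (he ▸ hi.2) hB)

theorem pvDfs_inv (M N : Int) :
    ∀ (f : Nat) (g : List (List Int)) (i j : Int), pvShape M N g →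
      pvShape M N (pvDfs M N f g i j).2 ∧ pvZ (pvDfs M N f g i j).2 ≤ pvZ g := by
  intro f
  induction f with
  | zero => intro g i j h; exact ⟨h, le_rfl⟩
  | succ f ih =>
    intro g i j h
    rw [pvDfs]
    split_ifs with hg
    · have hsm := pvShape_mark M N i j g h ⟨hg.1, hg.2.1, hg.2.2.1, hg.2.2.2.1⟩
      have hzm := pvZ_mark M N i j g h hg
      have := pvFold_inv M N
        (fun acc c => (acc.1 + (pvDfs M N f acc.2 c.1 c.2).1, (pvDfs M N f acc.2 c.1 c.2).2))
        (fun acc c ha => ih acc.2 c.1 c.2 ha)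
        (pvNbrs i j) (1, pvMark g i j) hsm
      exact ⟨this.1, le_trans this.2 (show pvZ (pvMark g i j) ≤ pvZ g by omega)⟩
    · exact ⟨h, le_rfl⟩

-- fuel irrelevance: any fuel beyond the number of zeros computes the same dfs
theorem pvDfs_mono (M N : Int) :
    ∀ (f1 f2 : Nat) (g : List (List Int)) (i j : Int), pvShape M N g →
      pvZ g < f1 → pvZ g < f2 → pvDfs M N f1 g i j = pvDfs M N f2 g i j := by
  intro f1
  induction f1 with
  | zero => intro f2 g i j _ h1 _; omega
  | succ f1 ih =>
    intro f2 g i j h h1 h2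
    cases f2 with
    | zero => omega
    | succ f2 =>
      rw [pvDfs, pvDfs]
      split_ifs with hg
      · have hb := And.intro hg.1 (And.intro hg.2.1 (And.intro hg.2.2.1 hg.2.2.2.1))
        have hsm := pvShape_mark M N i j g h hb
        have hzm := pvZ_mark M N i j g h hg
        have hzp := pvZ_pos M N i j g h hg
        refine pvFold_congr M N (pvZ (pvMark g i j)) _ _ ?_ ?_
          (pvNbrs i j) (1, pvMark g i j) hsm le_rfl
        · exact fun acc c ha => pvDfs_inv M N f1 acc.2 c.1 c.2 ha
        · intro acc c ha hB
          rw [ih f2 acc.2 c.1 c.2 ha (by omega) (by omega)]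
      · rfl

theorem pvRun_inv (M N : Int) (g : List (List Int)) (i j : Int) (h : pvShape M N g) :
    pvShape M N (pvRun M N g i j).2 ∧ pvZ (pvRun M N g i j).2 ≤ pvZ g :=
  pvDfs_inv M N (pvZ g + 1) g i j h

-- one-step unfolding of A's dfs through its canonical-fuel wrapper
theorem pvRun_unfold (M N : Int) (g : List (List Int)) (i j : Int) (h : pvShape M N g) :
    pvRun M N g i j =
      if 0 ≤ i ∧ i < M ∧ 0 ≤ j ∧ j < N ∧ pvCell g i j = 0 then
        (pvNbrs i j).foldl (pvStep M N) (1, pvMark g i j)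
      else (0, g) := by
  rw [pvRun, pvDfs]
  split_ifs with hg
  · have hb := And.intro hg.1 (And.intro hg.2.1 (And.intro hg.2.2.1 hg.2.2.2.1))
    have hsm := pvShape_mark M N i j g h hb
    have hzm := pvZ_mark M N i j g h hg
    have hzp := pvZ_pos M N i j g h hg
    refine pvFold_congr M N (pvZ (pvMark g i j)) _ (pvStep M N) ?_ ?_
      (pvNbrs i j) (1, pvMark g i j) hsm le_rfl
    · exact fun acc c ha => pvDfs_inv M N (pvZ g) acc.2 c.1 c.2 ha
    · intro acc c ha hB
      rw [pvStep, pvRun,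
        pvDfs_mono M N (pvZ g) (pvZ acc.2 + 1) acc.2 c.1 c.2 ha (by omega) (by omega)]
  · rfl

-- the starting count shifts out of a pvStep-shaped fold
theorem pvFold_shift {α : Type} (h : List (List Int) → α → Int × List (List Int)) :
    ∀ (L : List α) (a : Int) (g : List (List Int)),
      L.foldl (fun acc c => (acc.1 + (h acc.2 c).1, (h acc.2 c).2)) (a, g) =
        (a + (L.foldl (fun acc c => (acc.1 + (h acc.2 c).1, (h acc.2 c).2)) (0, g)).1,
         (L.foldl (fun acc c => (acc.1 + (h acc.2 c).1, (h acc.2 c).2)) (0, g)).2) := by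
  intro L
  induction L with
  | nil => intro a g; simp
  | cons c L ih =>
    intro a g
    rw [List.foldl_cons, List.foldl_cons]
    rw [ih (a + (h g c).1) (h g c).2]
    rw [show ((0:Int) + (h g c).1, (h g c).2) = ((h g c).1, (h g c).2) by simp]
    rw [ih ((h g c).1) (h g c).2]
    simp [add_assoc]

theorem pvStep_shift (M N : Int) (L : List (Int × Int)) (a : Int) (g : List (List Int)) :
    L.foldl (pvStep M N) (a, g) =
      (a + (L.foldl (pvStep M N) (0, g)).1, (L.foldl (pvStep M N) (0, g)).2) :=
  pvFold_shift (fun g (c : Int × Int) => pvRun M N g c.1 c.2) L a g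

-- MAIN: B's stack loop computes the sequential fold of A's dfs over the stack
theorem pvLoop_main (M N : Int) :
    ∀ (f : Nat) (g : List (List Int)) (st : List (Int × Int)) (k : Int),
      pvShape M N g → st.length + 8 * pvZ g < f →
      pvLoop M N f g st k =
        (k + (st.foldl (pvStep M N) (0, g)).1, (st.foldl (pvStep M N) (0, g)).2) := by
  intro f
  induction f with
  | zero => intro g st k _ hf; omega
  | succ f ih =>
    intro g st k h hf
    cases st with
    | nil => simp [pvLoop]
    | cons c st =>
      rw [pvLoop]
      rw [List.foldl_cons]
      have hrunfold := pvRun_unfold M N g c.1 c.2 h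
      split_ifs with hg
      · -- productive pop: pops c, marks it, pushes its 8 neighbours
        have hb := And.intro hg.1 (And.intro hg.2.1 (And.intro hg.2.2.1 hg.2.2.2.1))
        have hsm := pvShape_mark M N c.1 c.2 g h hb
        have hzm := pvZ_mark M N c.1 c.2 g h hg
        rw [ih (pvMark g c.1 c.2) (pvNbrs c.1 c.2 ++ st) (k+1) hsm
            (by simp only [List.length_append, pvNbrs, List.length_cons] at hf ⊢; simp; omega)]
        rw [if_pos hg] at hrunfold
        have hstep0 : pvStep M N (0, g) c = ((pvRun M N g c.1 c.2).1, (pvRun M N g c.1 c.2).2) := by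
          rw [pvStep]; simp
        rw [hstep0, hrunfold]
        rw [List.foldl_append]
        rw [pvStep_shift M N (pvNbrs c.1 c.2) 1 (pvMark g c.1 c.2)]
        generalize List.foldl (pvStep M N) (0, pvMark g c.1 c.2) (pvNbrs c.1 c.2) = Y
        obtain ⟨y1, y2⟩ := Y
        dsimp only
        rw [pvStep_shift M N st y1 y2, pvStep_shift M N st (1 + y1) y2]
        generalize List.foldl (pvStep M N) (0, y2) st = Z
        obtain ⟨z1, z2⟩ := Z
        dsimp only
        simp only [Prod.mk.injEq]
        exact ⟨by ring, trivial⟩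
      · rw [ih g st k h (by simp at hf ⊢; omega)]
        have hstep0 : pvStep M N (0, g) c = ((0:Int), g) := by
          rw [pvStep]; rw [pvRun_unfold M N g c.1 c.2 h, if_neg hg]; simp
        rw [hstep0]

-- the two per-cell branches agree
theorem pvBranch_eq (M N i j : Int) (g : List (List Int)) (h : pvShape M N g) :
    pvLoop M N (8 * pvZ g + 2) g [(i, j)] 0 = pvRun M N g i j := by
  rw [pvLoop_main M N (8 * pvZ g + 2) g [(i, j)] 0 h (by simp; omega)]
  rw [List.foldl_cons, List.foldl_nil]
  rw [show pvStep M N (0, g) (i, j) = ((pvRun M N g i j).1, (pvRun M N g i j).2) by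
    rw [pvStep]; simp]
  simp

theorem pvInner_eq (M N i : Int) :
    ∀ (L : List Int) (s : List (List Int) × List Int), pvShape M N s.1 →
      (L.foldl (fun (s : List (List Int) × List Int) j =>
          if pvCell s.1 i j = 0 then
            ((pvLoop M N (8 * pvZ s.1 + 2) s.1 [(i, j)] 0).2,
             s.2 ++ [(pvLoop M N (8 * pvZ s.1 + 2) s.1 [(i, j)] 0).1])
          else s) s
        = L.foldl (fun (s : List (List Int) × List Int) j =>
          if pvCell s.1 i j = 0 then
            ((pvRun M N s.1 i j).2, s.2 ++ [(pvRun M N s.1 i j).1])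
          else s) s)
      ∧ pvShape M N (L.foldl (fun (s : List (List Int) × List Int) j =>
          if pvCell s.1 i j = 0 then
            ((pvRun M N s.1 i j).2, s.2 ++ [(pvRun M N s.1 i j).1])
          else s) s).1 := by
  intro L
  induction L with
  | nil => intro s hs; exact ⟨rfl, hs⟩
  | cons j L ih =>
    intro s hs
    rw [List.foldl_cons, List.foldl_cons]
    by_cases hc : pvCell s.1 i j = 0
    · rw [if_pos hc, if_pos hc, pvBranch_eq M N i j s.1 hs]
      exact ih _ (pvRun_inv M N s.1 i j hs).1
    · rw [if_neg hc, if_neg hc]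
      exact ih s hs

theorem pvOuter_eq (M N : Int) :
    ∀ (LI : List Int) (s : List (List Int) × List Int), pvShape M N s.1 →
      LI.foldl (fun s i => (PySem.List.pyRange 0 N 1).foldl
          (fun (s : List (List Int) × List Int) j =>
            if pvCell s.1 i j = 0 then
              ((pvLoop M N (8 * pvZ s.1 + 2) s.1 [(i, j)] 0).2,
               s.2 ++ [(pvLoop M N (8 * pvZ s.1 + 2) s.1 [(i, j)] 0).1])
            else s) s) s
        = LI.foldl (fun s i => (PySem.List.pyRange 0 N 1).foldl
          (fun (s : List (List Int) × List Int) j =>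
            if pvCell s.1 i j = 0 then
              ((pvRun M N s.1 i j).2, s.2 ++ [(pvRun M N s.1 i j).1])
            else s) s) s := by
  intro LI
  induction LI with
  | nil => intro s _; rfl
  | cons i LI ih =>
    intro s hs
    rw [List.foldl_cons, List.foldl_cons]
    have h1 := pvInner_eq M N i (PySem.List.pyRange 0 N 1) s hs
    rw [h1.1]
    exact ih _ h1.2

-- ===== VERDICT (by name: the statement is the Claim_ definition above) =====
theorem pondSizes_spec : Claim_equal_pondSizes := by
  intro land _ hpre
  unfold Spec_pondSizes
  have hshape : pvShape (land.length : Int) ((PySem.List.pyGetD land 0 []).length : Int) land := by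
    constructor
    · exact le_refl _
    · intro r hr
      exact_mod_cast hpre.2 r hr
  simp only [pondSizes, pondSizes_alt]
  rw [pvOuter_eq (land.length : Int) ((PySem.List.pyGetD land 0 []).length : Int)
      (PySem.List.pyRange 0 (land.length : Int) 1) (land, []) hshape]
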